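-- pv_equiv track=rewrite | github.com/AndrewDales/Sliders | slider/slider.py | _find_parity
-- ===== SOURCE A (Python) =====
-- import copy
--
-- def _find_parity(perm_1, perm_2):
--     """ Whether perm_1 and perm_2 have the same parity i.e. if there are an even number of swaps from perm_1 to
--     perm_2, the parity is 0, if there are a odd number of swaps the parity is 1"""
--     parity = 0
--     trial = copy.copy(perm_1)
--     for i in range(len(trial) - 1):
--         # if element i is not in the correct place, swap it with the correct element
--         p, q = trial[i], perm_2[i]
--         if p != q:
--             j = trial.index(q)
--             trial[i], trial[j] = trial[j], trial[i]
--             parity += 1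
--     return parity % 2
-- ===== SOURCE B (Python) =====
-- def _find_parity(perm_1, perm_2):
--     """ Whether perm_1 and perm_2 have the same parity i.e. if there are an even number of swaps from perm_1 to
--     perm_2, the parity is 0, if there are a odd number of swaps the parity is 1"""
--     def go(t, targets):
--         # recursion: fix the first position, recurse on the remainder
--         if not targets:
--             return 0
--         q = targets[0]
--         a = t[0]
--         u = t[1:]
--         if a == q:
--             return go(u, targets[1:])
--         k = u.index(q)
--         u[k] = a
--         return 1 - go(u, targets[1:])
--     if len(perm_1) <= 1:
--         return 0
--     return go(list(perm_1), perm_2[:len(perm_1) - 1])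
-- ===== Notes on version B (the rewrite author's own statement) =====
-- stated objective: alternative
-- what changed: Replaces A's index loop over a mutated full array (whole-list .index, in-place double assignment, swap counter taken mod 2 at the end) by a structural recursion that fixes the first position, searches only the remaining tail, and combines the parity bit as 1 - recursive result.
-- outside the precondition, e.g. on _find_parity([1, 2, 1, 1], [1, 1, 1, 1]): A returns 1, B returns 0; on _find_parity([1, 1, 2], [2, 2, 1]): A returns 0, B raises ValueError
import Mathlib
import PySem

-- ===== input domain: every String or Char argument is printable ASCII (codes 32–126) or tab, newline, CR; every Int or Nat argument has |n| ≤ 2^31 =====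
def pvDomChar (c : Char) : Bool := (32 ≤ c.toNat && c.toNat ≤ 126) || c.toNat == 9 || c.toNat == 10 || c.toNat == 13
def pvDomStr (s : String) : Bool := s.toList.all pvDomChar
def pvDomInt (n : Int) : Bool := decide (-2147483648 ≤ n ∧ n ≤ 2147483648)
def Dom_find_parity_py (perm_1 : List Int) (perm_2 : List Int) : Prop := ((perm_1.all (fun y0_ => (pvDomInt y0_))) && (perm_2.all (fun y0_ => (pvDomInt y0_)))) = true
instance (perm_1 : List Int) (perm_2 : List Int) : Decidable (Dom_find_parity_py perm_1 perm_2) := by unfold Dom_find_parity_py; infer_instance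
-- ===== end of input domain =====

-- B replaces A's index loop with in-place swaps on the whole array by a structural recursion on
-- the remainder lists (objective: alternative decomposition, same asymptotic cost).

-- ===== PORT A =====
-- one iteration of A's for-loop: s = (trial, parity), i the loop index
def find_parity_step (perm_2 : List Int) (s : List Int × Int) (i : Int) : List Int × Int :=
  match PySem.List.pyGet? s.1 i, PySem.List.pyGet? perm_2 i with
  | some p, some q =>
    if p ≠ q then
      match PySem.List.index? s.1 q with
      | some j =>
        -- trial[i], trial[j] = trial[j], trial[i]  (i ≥ 0 from range, j : Nat from .index: exact)
        let tj := s.1.getD j 0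
        ((s.1.set i.toNat tj).set j p, s.2 + 1)
      | none => s            -- ValueError: outside Pre_
    else s
  | _, _ => s                -- IndexError on perm_2[i]: outside Pre_

def find_parity_py (perm_1 : List Int) (perm_2 : List Int) : Int :=
  let st := (PySem.List.pyRange 0 ((perm_1.length : Int) - 1) 1).foldl (find_parity_step perm_2) (perm_1, 0)
  PySem.Int.mod st.2 2

-- ===== PORT B =====
-- go(t, targets): fix the first position, recurse on the remainder
def find_parity_go : List Int → List Int → Int
  | _, [] => 0
  | [], _ :: _ => 0          -- t[0] IndexError: unreachable under Pre_
  | a :: u, q :: qs =>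
    if a = q then find_parity_go u qs
    else
      match PySem.List.index? u q with
      | some k => 1 - find_parity_go (u.set k a) qs
      | none => 0            -- ValueError: outside Pre_

def find_parity_py_alt (perm_1 : List Int) (perm_2 : List Int) : Int :=
  if perm_1.length ≤ 1 then 0
  else find_parity_go perm_1 (PySem.List.slice perm_2 (some 0) (some ((perm_1.length : Int) - 1)))

-- ===== PRECONDITION & SPEC =====
-- Pre_ admits the trivial inputs (length ≤ 1 or identical lists) and the pairs where perm_1 is
-- duplicate-free and every one of the n-1 targets perm_2[i] that A inspects occurs in perm_1; it
-- excludes the remaining pairs (duplicates in perm_1, targets missing from it), where A may raise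
-- ValueError and, where it returns, the parity of such a pair is ill-defined and A's whole-list
-- .index (which may swap back into the already-fixed prefix) gives an accidental answer.
def Pre_find_parity_py (perm_1 : List Int) (perm_2 : List Int) : Prop :=
  perm_1.length ≤ 1 ∨ perm_1 = perm_2 ∨
    (perm_1.Nodup ∧ perm_1.length - 1 ≤ perm_2.length ∧
      (perm_2.take (perm_1.length - 1)).Subperm perm_1)
instance (perm_1 : List Int) (perm_2 : List Int) : Decidable (Pre_find_parity_py perm_1 perm_2) := by
  unfold Pre_find_parity_py; infer_instance

def pvWitness_find_parity_py : List Int × List Int := ([1, 2, 3], [2, 3, 1])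

def Spec_find_parity_py (perm_1 : List Int) (perm_2 : List Int) (out : Int) : Prop := out = find_parity_py_alt perm_1 perm_2
instance (perm_1 : List Int) (perm_2 : List Int) (out : Int) : Decidable (Spec_find_parity_py perm_1 perm_2 out) := by unfold Spec_find_parity_py; infer_instance

-- ===== CLAIM (what is proved, stated in full; the proofs are below) =====
def Claim_equal_find_parity_py : Prop := ∀ (perm_1 : List Int) (perm_2 : List Int), Dom_find_parity_py perm_1 perm_2 → Pre_find_parity_py perm_1 perm_2 → Spec_find_parity_py perm_1 perm_2 (find_parity_py perm_1 perm_2)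

-- ===== LEMMAS AND PROOFS =====

-- setting an element past an appended prefix
lemma pv_set_append_add (l : List Int) : ∀ (m : List Int) (n : Nat) (v : Int),
    (l ++ m).set (l.length + n) v = l ++ m.set n v := by
  induction l with
  | nil => intro m n v; simp
  | cons x xs ih =>
    intro m n v
    simp [Nat.succ_add, ih m n v]

-- .index over an appended prefix not containing the value
lemma pv_index?_append_not_mem (v : Int) : ∀ (l t : List Int), v ∉ l →
    PySem.List.index? (l ++ t) v = (PySem.List.index? t v).map (· + l.length) := by
  intro l
  induction l with
  | nil =>
    intro t _
    rw [List.nil_append]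
    cases h : PySem.List.index? t v <;> simp
  | cons x xs ih =>
    intro t hv
    have hx : x ≠ v := by intro h; exact hv (by simp [h])
    rw [List.cons_append, PySem.List.index?_cons_of_ne _ hx, ih t (by intro h; exact hv (by simp [h]))]
    cases h : PySem.List.index? t v <;> simp [Nat.add_assoc]

-- replacing the occurrence of q at index k by a is, up to permutation, trading a for q
lemma pv_set_perm (u : List Int) (a : Int) (k : Nat) (hk : k < u.length) (hq : u[k] = q) :
    (u.set k a).Perm (a :: (u.take k ++ u.drop (k + 1))) ∧
    u.Perm (q :: (u.take k ++ u.drop (k + 1))) := by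
  constructor
  · rw [List.set_eq_take_cons_drop a hk]
    exact List.perm_middle
  · conv_lhs => rw [← List.take_append_drop k u, List.drop_eq_getElem_cons hk, hq]
    exact List.perm_middle

lemma find_parity_go_01 : ∀ (qs t : List Int), find_parity_go t qs = 0 ∨ find_parity_go t qs = 1 := by
  intro qs
  induction qs with
  | nil => intro t; cases t <;> simp [find_parity_go]
  | cons q qs ih =>
    intro t
    cases t with
    | nil => simp [find_parity_go]
    | cons a u =>
      by_cases haq : a = q
      · simpa [find_parity_go, haq] using ih u
      · cases hidx : PySem.List.index? u q with
        | none =>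
          rw [PySem.List.index?_eq_idxOf?] at hidx
          simp [find_parity_go, haq, hidx]
        | some k =>
          rw [PySem.List.index?_eq_idxOf?] at hidx
          rcases ih (u.set k a) with h | h <;> simp [find_parity_go, haq, hidx, h]

lemma find_parity_key : ∀ (qs pre t r e : List Int) (par : Int),
    (pre ++ t).Nodup → t.Perm (qs ++ r) →
    ((PySem.List.pyRange (pre.length : Int) ((pre.length : Int) + (qs.length : Int)) 1).foldl
        (find_parity_step (pre ++ qs ++ e)) (pre ++ t, par)).2 % 2
      = (par + find_parity_go t qs) % 2 := by
  intro qs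
  induction qs with
  | nil =>
    intro pre t r e par hnd hperm
    rw [show ((pre.length : Int) + ((List.nil (α := Int)).length : Int)) = (pre.length : Int) by simp,
        PySem.List.pyRange_one_eq_nil (le_refl _)]
    cases t <;> simp [find_parity_go]
  | cons q qs ih =>
    intro pre t r e par hnd hperm
    -- t is nonempty
    cases t with
    | nil =>
      have := hperm.length_eq
      simp at this
    | cons a u =>
      have hlen : ((q :: qs).length : Int) = (qs.length : Int) + 1 := by
        simp [List.length_cons]
      have hcons : PySem.List.pyRange (pre.length : Int) ((pre.length : Int) + ((q :: qs).length : Int)) 1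
          = (pre.length : Int) :: PySem.List.pyRange ((pre.length : Int) + 1) ((pre.length : Int) + ((q :: qs).length : Int)) 1 := by
        apply PySem.List.pyRange_one_cons
        rw [hlen]; omega
      rw [hcons, List.foldl_cons]
      have hP : pre ++ (q :: qs) ++ e = pre ++ q :: (qs ++ e) := by simp
      have hgetT : PySem.List.pyGet? (pre ++ a :: u) (pre.length : Int) = some a :=
        PySem.List.pyGet?_append_length pre u a
      have hgetP : PySem.List.pyGet? (pre ++ (q :: qs) ++ e) (pre.length : Int) = some q := by
        rw [hP]; exact PySem.List.pyGet?_append_length pre (qs ++ e) q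
      have hperm' : (a :: u).Perm (q :: (qs ++ r)) := by simpa using hperm
      by_cases haq : a = q
      · -- no swap at this step
        have hstep : find_parity_step (pre ++ (q :: qs) ++ e) (pre ++ a :: u, par) (pre.length : Int)
            = (pre ++ a :: u, par) := by
          simp [find_parity_step, haq]
        rw [hstep]
        have hnd' : ((pre ++ [q]) ++ u).Nodup := by
          simpa [haq] using hnd
        have hperm'' : u.Perm (qs ++ r) := by
          have h' := hperm'
          rw [haq] at h'
          exact h'.cons_inv
        have hIH := ih (pre ++ [q]) u r e par hnd' hperm''
        have he1 : (((pre ++ [q]).length : Nat) : Int) = (pre.length : Int) + 1 := by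
          simp
        rw [he1] at hIH
        have he2 : (pre.length : Int) + ((q :: qs).length : Int) = ((pre.length : Int) + 1) + (qs.length : Int) := by
          rw [hlen]; ring
        rw [he2]
        have he3 : (pre ++ [q]) ++ u = pre ++ a :: u := by simp [haq]
        rw [he3] at hIH
        have he4 : (pre ++ [q]) ++ qs ++ e = pre ++ (q :: qs) ++ e := by simp
        rw [he4] at hIH
        rw [hIH]
        simp [find_parity_go, haq]
      · -- swap with the element q found in u
        have hqmem : q ∈ u := by
          have : q ∈ a :: u := hperm'.mem_iff.mpr (by simp)
          rcases this with _ | h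
          · exact absurd rfl haq
          · assumption
        have hqpre : q ∉ pre := by
          intro hqp
          have hdisj := List.disjoint_of_nodup_append hnd
          exact hdisj hqp (by simp [hqmem])
        obtain ⟨k, hk⟩ := Option.isSome_iff_exists.mp ((PySem.List.index?_isSome_iff u q).mpr hqmem)
        obtain ⟨hklt, hkq, -⟩ := PySem.List.getElem_of_index?_eq_some hk
        have hidxau : PySem.List.index? (a :: u) q = some (k + 1) := by
          rw [PySem.List.index?_cons_of_ne _ haq, hk]; rfl
        have hidx : PySem.List.index? (pre ++ a :: u) q = some (pre.length + (k + 1)) := by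
          rw [pv_index?_append_not_mem q pre (a :: u) hqpre, hidxau]
          simp [Nat.add_comm]
        -- trial[j] = q
        have hgetD : (pre ++ a :: u).getD (pre.length + (k + 1)) 0 = q := by
          obtain ⟨hj, hjq, -⟩ := PySem.List.getElem_of_index?_eq_some hidx
          rw [List.getD_eq_getElem?_getD, List.getElem?_eq_getElem hj, hjq]
          rfl
        -- the two assignments
        have hset1 : (pre ++ a :: u).set ((pre.length : Int)).toNat q = pre ++ q :: u := by
          have : (pre ++ a :: u).set (pre.length + 0) q = pre ++ (a :: u).set 0 q :=
            pv_set_append_add pre (a :: u) 0 q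
          simpa using this
        have hset2 : (pre ++ q :: u).set (pre.length + (k + 1)) a = pre ++ q :: u.set k a := by
          have := pv_set_append_add pre (q :: u) (k + 1) a
          simpa using this
        have hstep : find_parity_step (pre ++ (q :: qs) ++ e) (pre ++ a :: u, par) (pre.length : Int)
            = (pre ++ q :: u.set k a, par + 1) := by
          simp only [find_parity_step, hgetT, hgetP, hidx]
          rw [if_pos haq]
          simp only [hgetD, hset1, hset2]
        rw [hstep]
        -- permutation bookkeeping
        obtain ⟨hpermset, hpermu⟩ := pv_set_perm u a k hklt hkq
        have hswap : (q :: u.set k a).Perm (a :: u) :=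
          (hpermset.cons q).trans ((List.Perm.swap a q _).trans (hpermu.symm.cons a))
        have hnd' : ((pre ++ [q]) ++ u.set k a).Nodup := by
          have : (pre ++ a :: u).Perm (pre ++ q :: u.set k a) :=
            List.Perm.append_left pre hswap.symm
          simpa using hnd.perm this
        have hperm'' : (u.set k a).Perm (qs ++ r) :=
          (hswap.trans hperm').cons_inv
        have hIH := ih (pre ++ [q]) (u.set k a) r e (par + 1) hnd' hperm''
        have he1 : (((pre ++ [q]).length : Nat) : Int) = (pre.length : Int) + 1 := by simp
        rw [he1] at hIH
        have he2 : (pre.length : Int) + ((q :: qs).length : Int) = ((pre.length : Int) + 1) + (qs.length : Int) := by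
          rw [hlen]; ring
        rw [he2]
        have he3 : (pre ++ [q]) ++ u.set k a = pre ++ q :: u.set k a := by simp
        rw [he3] at hIH
        have he4 : (pre ++ [q]) ++ qs ++ e = pre ++ (q :: qs) ++ e := by simp
        rw [he4] at hIH
        rw [hIH]
        have hgo : find_parity_go (a :: u) (q :: qs) = 1 - find_parity_go (u.set k a) qs := by
          have hk' := hk
          rw [PySem.List.index?_eq_idxOf?] at hk'
          simp [find_parity_go, haq, hk']
        rw [hgo]
        omega

-- fold of A's loop body is the identity when trial and perm_2 are the same list
lemma pv_step_fixed (P : List Int) (par : Int) (i : Int) :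
    find_parity_step P (P, par) i = (P, par) := by
  unfold find_parity_step
  cases h : PySem.List.pyGet? P i <;> simp

lemma pv_foldl_fixed {α β : Type} (f : β → α → β) (s : β) (h : ∀ i, f s i = s) :
    ∀ l : List α, l.foldl f s = s := by
  intro l
  induction l with
  | nil => rfl
  | cons x xs ih => rw [List.foldl_cons, h x]; exact ih

-- B returns 0 when the targets are a prefix of the current list
lemma pv_go_prefix : ∀ (qs t : List Int), qs <+: t → find_parity_go t qs = 0 := by
  intro qs
  induction qs with
  | nil => intro t _; cases t <;> simp [find_parity_go]
  | cons q qs ih =>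
    intro t h
    obtain ⟨suf, rfl⟩ := h
    rw [List.cons_append]
    simpa [find_parity_go] using ih (qs ++ suf) ⟨suf, rfl⟩

-- ===== VERDICT (by name: the statement is the Claim_ definition above) =====
theorem find_parity_py_spec : Claim_equal_find_parity_py := by
  intro perm_1 perm_2 _ hpre
  unfold Spec_find_parity_py find_parity_py find_parity_py_alt
  by_cases hsmall : perm_1.length ≤ 1
  · rw [if_pos hsmall]
    rw [PySem.List.pyRange_one_eq_nil (by omega : ((perm_1.length : Int) - 1) ≤ 0)]
    simp [PySem.Int.mod]
  · rcases hpre with h1 | h2 | hperm3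
    · omega
    · -- identical lists: no swap ever happens, both sides are 0
      subst h2
      rw [if_neg hsmall]
      rw [pv_foldl_fixed _ _ (pv_step_fixed perm_1 0)]
      have hslice : PySem.List.slice perm_1 (some 0) (some ((perm_1.length : Int) - 1))
          = perm_1.take (perm_1.length - 1) := by
        rw [PySem.List.slice_zero_start]
        rw [show ((perm_1.length : Int) - 1) = ((perm_1.length - 1 : Nat) : Int) by omega]
        rw [PySem.List.slice_to_natCast]
      rw [hslice, pv_go_prefix _ _ (List.take_prefix _ _)]
      simp [PySem.Int.mod]
    · -- duplicate-free perm_1, every inspected target present: A's greedy swaps line up with B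
      rw [if_neg hsmall]
      obtain ⟨hnd, hlen2, hsub⟩ := hperm3
      have h1 : 2 ≤ perm_1.length := by omega
      set qs := perm_2.take (perm_1.length - 1) with hqs
      set e := perm_2.drop (perm_1.length - 1) with he
      have hsplit : perm_2 = qs ++ e := (List.take_append_drop _ _).symm
      have hqslen : qs.length = perm_1.length - 1 := by
        rw [hqs, List.length_take]; omega
      obtain ⟨l, hlp, hsubl⟩ := List.subperm_iff.mp hsub
      obtain ⟨r, hrp⟩ := hsubl.exists_perm_append
      have hperm : perm_1.Perm (qs ++ r) := hlp.symm.trans hrp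
      have hslice : PySem.List.slice perm_2 (some 0) (some ((perm_1.length : Int) - 1)) = qs := by
        rw [PySem.List.slice_zero_start]
        rw [show ((perm_1.length : Int) - 1) = ((perm_1.length - 1 : Nat) : Int) by omega]
        rw [PySem.List.slice_to_natCast]
      rw [hslice]
      have hkey := find_parity_key qs [] perm_1 r e 0 (by simpa using hnd) hperm
      simp only [List.nil_append, List.length_nil, Nat.cast_zero, zero_add] at hkey
      rw [← hsplit] at hkey
      have hrange : ((qs.length : Nat) : Int) = (perm_1.length : Int) - 1 := by omega
      rw [hrange] at hkey
      rw [PySem.Int.mod_eq_emod_of_pos (by norm_num)]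
      rw [hkey]
      rcases find_parity_go_01 qs perm_1 with h | h <;> rw [h] <;> norm_num
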